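-- pv_equiv track=rewrite | github.com/llctrautmann/Algorithms | src/masked.py | maskifylegacy
-- ===== SOURCE A (Python) =====
-- def maskifylegacy(cc):
--     """
--     need to take any input
--     check the length of the input
--     convert any values except the last four into hashtags
--     """
--
--     target = str(cc)
--     target_length = len(target)
--     target_list = [a for a in target]
--
--     for i in range(len(target_list) - 4):
--         target_list[i] = "#"
--
--     target_list_tup = tuple(target_list)
--
--     output = "".join(target_list_tup)
--     return output
-- ===== SOURCE B (Python) =====
-- def maskifylegacy(cc):
--     s = str(cc)
--     n = len(s)
--     return "#" * (n - 4) + s[-4:]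
-- ===== Notes on version B (the rewrite author's own statement) =====
-- stated objective: simpler
-- what changed: Replaced the per-character list-mutation loop with a closed-form concatenation of a repeated-hashtag prefix and the last-four-character slice.
import Mathlib
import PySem

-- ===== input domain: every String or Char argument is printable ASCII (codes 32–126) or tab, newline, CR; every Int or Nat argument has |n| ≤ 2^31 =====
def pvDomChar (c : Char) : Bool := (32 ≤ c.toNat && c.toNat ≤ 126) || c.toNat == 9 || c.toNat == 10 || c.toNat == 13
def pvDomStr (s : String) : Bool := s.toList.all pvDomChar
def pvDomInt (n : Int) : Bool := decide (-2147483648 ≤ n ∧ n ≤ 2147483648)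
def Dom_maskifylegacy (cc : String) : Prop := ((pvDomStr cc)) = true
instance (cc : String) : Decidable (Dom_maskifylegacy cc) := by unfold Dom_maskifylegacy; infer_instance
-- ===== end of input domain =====

-- B replaces A's index loop over a char list by the closed form '#'*(n-4) + s[-4:] (simpler).

-- ===== PORT A =====
-- target = str(cc) is cc itself; the list comprehension is toList; the for-loop over
-- range(len-4) assigning target_list[i] = "#" is a foldl over pyRange with pySetD
-- (every i is in range, so pySetD is exact); tuple() then "".join rebuilds the string.
def maskifylegacy (cc : String) : String :=
  let target := cc
  let targetList := target.toList
  let final :=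
    (PySem.List.pyRange 0 ((targetList.length : Int) - 4) 1).foldl
      (fun acc i => PySem.List.pySetD acc i '#') targetList
  String.mk final

-- ===== PORT B =====
-- s = str(cc) = cc; "#" * (n-4) is List.replicate ((n-4).toNat) (empty when n < 4,
-- like Python's negative repeat); s[-4:] is PySem.List.slice with start -4 (clamped).
def maskifylegacy_alt (cc : String) : String :=
  let s := cc.toList
  let n : Int := s.length
  String.mk (List.replicate (n - 4).toNat '#' ++ PySem.List.slice s (some (-4)) none)

-- ===== PRECONDITION & SPEC =====
def Spec_maskifylegacy (cc : String) (out : String) : Prop := out = maskifylegacy_alt cc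
instance (cc : String) (out : String) : Decidable (Spec_maskifylegacy cc out) := by unfold Spec_maskifylegacy; infer_instance

-- ===== CLAIM (what is proved, stated in full; the proofs are below) =====
def Claim_equal_maskifylegacy : Prop := ∀ (cc : String), Dom_maskifylegacy cc → Spec_maskifylegacy cc (maskifylegacy cc)

-- ===== LEMMAS AND PROOFS =====

-- A's loop invariant: setting indices 0..k-1 to '#' yields replicate k '#' ++ drop k.
theorem pv_loop_eq (l : List Char) (k : Nat) (hk : k ≤ l.length) :
    (PySem.List.pyRange 0 (k : Int) 1).foldl (fun acc i => PySem.List.pySetD acc i '#') l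
      = List.replicate k '#' ++ l.drop k := by
  induction k with
  | zero => simp
  | succ k ih =>
    have hk' : k ≤ l.length := Nat.le_of_succ_le hk
    have hsplit : PySem.List.pyRange 0 ((k + 1 : Nat) : Int) 1
        = PySem.List.pyRange 0 (k : Int) 1 ++ [(k : Int)] := by
      have := PySem.List.pyRange_one_succ_right (a := 0) (b := (k : Int)) (by exact_mod_cast Nat.zero_le k)
      push_cast
      exact this
    rw [hsplit, List.foldl_append, ih hk']
    simp only [List.foldl_cons, List.foldl_nil, PySem.List.pySetD_natCast]
    have hlen : (List.replicate k '#').length = k := List.length_replicate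
    have hlt : k < l.length := hk
    rw [List.set_append]
    simp only [hlen, lt_irrefl, Nat.sub_self]
    have hdrop : l.drop k = l[k] :: l.drop (k + 1) := List.drop_eq_getElem_cons hlt
    rw [hdrop, List.set_cons_zero]
    simp [List.replicate_succ' (n := k)]

-- ===== VERDICT (by name: the statement is the Claim_ definition above) =====
theorem maskifylegacy_spec : Claim_equal_maskifylegacy := by
  intro cc _
  unfold Spec_maskifylegacy maskifylegacy maskifylegacy_alt
  simp only
  set l := cc.toList with hl
  have hslice : PySem.List.slice l (some (-4)) none = l.drop (l.length - 4) := by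
    simpa using PySem.List.slice_from_neg_ofNat (xs := l) (k := 4) (by norm_num)
  rw [hslice]
  have hrange : PySem.List.pyRange 0 ((l.length : Int) - 4) 1
      = PySem.List.pyRange 0 ((l.length - 4 : Nat) : Int) 1 := by
    by_cases h : 4 ≤ l.length
    · congr 1; omega
    · rw [PySem.List.pyRange_one_eq_nil (by omega), PySem.List.pyRange_one_eq_nil (by omega)]
  have htoNat : ((l.length : Int) - 4).toNat = l.length - 4 := by omega
  rw [hrange, pv_loop_eq l (l.length - 4) (Nat.sub_le _ _), htoNat]
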